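-- pv_equiv track=rewrite | github.com/mtjen/132 | assignment2.py | subtractSub
-- ===== SOURCE A (Python) =====
-- def subtractSub (inputString, subString):
--     count = 0
--     maxCount = len(subString)
--     result = ""
--     for character in inputString:
--         if count == maxCount:
--             result = result + character
--         else:
--             if character == subString[count]:
--                 count = count + 1
--             else:
--                 result = result + character
--     return result
-- ===== SOURCE B (Python) =====
-- def subtractSub(inputString, subString):
--     # Pass 1: greedily collect the indices of characters that advance the
--     # subsequence pointer (partial matches are deleted too, as intended).
--     removed = set()
--     count = 0
--     for i, ch in enumerate(inputString):
--         if count < len(subString) and ch == subString[count]: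
--             removed.add(i)
--             count += 1
--     # Pass 2: keep every character whose index was not marked for removal.
--     return ''.join(ch for i, ch in enumerate(inputString) if i not in removed)
-- ===== Notes on version B (the rewrite author's own statement) =====
-- stated objective: alternative
-- what changed: A's single interleaved loop that matches the subsequence pointer while concatenating kept characters is replaced by two passes: one fold over enumerate that collects the removed indices into a set, then a filter-and-join over the indexed characters.
import Mathlib
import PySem

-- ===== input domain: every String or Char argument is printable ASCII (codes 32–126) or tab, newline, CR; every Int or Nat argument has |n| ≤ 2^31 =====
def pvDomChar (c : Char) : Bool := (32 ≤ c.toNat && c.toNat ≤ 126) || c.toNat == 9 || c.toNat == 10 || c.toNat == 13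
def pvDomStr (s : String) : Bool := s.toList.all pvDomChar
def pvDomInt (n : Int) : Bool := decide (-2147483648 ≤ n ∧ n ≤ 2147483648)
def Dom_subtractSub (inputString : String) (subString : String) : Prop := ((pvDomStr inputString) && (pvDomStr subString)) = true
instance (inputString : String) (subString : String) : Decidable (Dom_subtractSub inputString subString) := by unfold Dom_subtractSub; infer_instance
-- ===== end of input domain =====

-- B replaces A's single interleaved match-and-copy loop by two passes: an index-collection
-- pass recording which positions the greedy subsequence pointer consumes, then a filtering
-- pass joining the characters at the unremoved positions (objective: alternative decomposition).

-- ===== PORT A =====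
-- single loop, state (count, result); subString[count] is in range because count < maxCount there
def subtractSub (inputString : String) (subString : String) : String :=
  let subL := subString.toList
  let maxCount := subL.length
  let st := inputString.toList.foldl
    (fun (st : Nat × List Char) character =>
      if st.1 = maxCount then (st.1, st.2 ++ [character])
      else if subL[st.1]? = some character then (st.1 + 1, st.2)
      else (st.1, st.2 ++ [character]))
    (0, [])
  String.mk st.2

-- ===== PORT B =====
-- pass 1: fold over enumerate collecting removed indices into a PySem.Set; pass 2: filter + join
def subtractSub_alt (inputString : String) (subString : String) : String :=
  let cs := inputString.toList
  let subL := subString.toList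
  let removed : PySem.Set Int :=
    ((PySem.List.enumerate cs 0).foldl
      (fun (st : Nat × PySem.Set Int) p =>
        if st.1 < subL.length ∧ subL[st.1]? = some p.2
        then (st.1 + 1, PySem.Set.add st.2 p.1)
        else st)
      (0, PySem.Set.empty)).2
  String.mk (((PySem.List.enumerate cs 0).filter
      (fun p => !(PySem.Set.contains removed p.1))).map (·.2))

-- ===== PRECONDITION & SPEC =====
def Spec_subtractSub (inputString : String) (subString : String) (out : String) : Prop := out = subtractSub_alt inputString subString
instance (inputString : String) (subString : String) (out : String) : Decidable (Spec_subtractSub inputString subString out) := by unfold Spec_subtractSub; infer_instance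

-- ===== CLAIM (what is proved, stated in full; the proofs are below) =====
def Claim_equal_subtractSub : Prop := ∀ (inputString : String) (subString : String), Dom_subtractSub inputString subString → Spec_subtractSub inputString subString (subtractSub inputString subString)

-- ===== LEMMAS AND PROOFS =====

-- the common specification: greedy subsequence deletion over char lists
def pvSpec : List Char → List Char → List Char
  | cs, [] => cs
  | [], _ :: _ => []
  | c :: cs, p :: ps => if c = p then pvSpec cs ps else c :: pvSpec cs (p :: ps)

-- indices (starting at i) deleted by the greedy match
def pvRem : List Char → List Char → Int → List Int
  | _, [], _ => []
  | [], _ :: _, _ => []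
  | c :: cs, p :: ps, i =>
      if c = p then i :: pvRem cs ps (i + 1) else pvRem cs (p :: ps) (i + 1)

lemma pvRem_ge (cs rem : List Char) (i : Int) : ∀ j ∈ pvRem cs rem i, i ≤ j := by
  induction cs generalizing rem i with
  | nil => cases rem <;> simp [pvRem]
  | cons c cs ih =>
    cases rem with
    | nil => simp [pvRem]
    | cons p ps =>
      intro j hj
      simp only [pvRem] at hj
      split at hj
      · rcases List.mem_cons.mp hj with h | h
        · omega
        · have := ih ps (i + 1) j h; omega
      · have := ih (p :: ps) (i + 1) j hj; omega

lemma subtractSub_loop (subL : List Char) (cs : List Char) (count : Nat) (acc : List Char)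
    (hc : count ≤ subL.length) :
    (cs.foldl
      (fun (st : Nat × List Char) character =>
        if st.1 = subL.length then (st.1, st.2 ++ [character])
        else if subL[st.1]? = some character then (st.1 + 1, st.2)
        else (st.1, st.2 ++ [character]))
      (count, acc)).2 = acc ++ pvSpec cs (subL.drop count) := by
  induction cs generalizing count acc with
  | nil => cases h : subL.drop count <;> simp [pvSpec]
  | cons c cs ih =>
    by_cases hend : count = subL.length
    · subst hend
      have hdrop : subL.drop subL.length = [] := by simp
      have step : ∀ acc' : List Char,
          (cs.foldl
            (fun (st : Nat × List Char) character =>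
              if st.1 = subL.length then (st.1, st.2 ++ [character])
              else if subL[st.1]? = some character then (st.1 + 1, st.2)
              else (st.1, st.2 ++ [character]))
            (subL.length, acc')).2 = acc' ++ cs := by
        intro acc'
        have h := ih subL.length acc' le_rfl
        rw [hdrop] at h
        rw [h]
        cases cs <;> simp [pvSpec]
      simp only [List.foldl_cons, if_true]
      rw [hdrop, step (acc ++ [c])]
      cases cs <;> simp [pvSpec]
    · have hlt : count < subL.length := lt_of_le_of_ne hc hend
      obtain ⟨p, ps, hdrop⟩ : ∃ p ps, subL.drop count = p :: ps := by
        cases h : subL.drop count with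
        | nil => exfalso; have := List.drop_eq_nil_iff.mp h; omega
        | cons p ps => exact ⟨p, ps, rfl⟩
      have hget : subL[count]? = some p := by
        have : subL[count]? = (subL.drop count)[0]? := by
          simp [List.getElem?_drop]
        rw [this, hdrop]; rfl
      have hdrop1 : subL.drop (count + 1) = ps := by
        have : subL.drop (count + 1) = (subL.drop count).tail := by
          rw [List.tail_drop]
        rw [this, hdrop]; rfl
      simp only [List.foldl_cons, if_neg hend, hget]
      by_cases hcp : c = p
      · subst hcp
        simp only [if_true]
        rw [ih (count + 1) acc (by omega), hdrop1, hdrop, pvSpec, if_pos rfl]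
      · have : ¬ (some p = some c) := by simp [Ne.symm hcp]
        simp only [if_neg this]
        rw [ih count (acc ++ [c]) hc, hdrop, pvSpec, if_neg hcp]
        simp

lemma passOne (subL : List Char) (cs : List Char) (count : Nat) (S : List Int) (i : Int)
    (hS : ∀ x ∈ S, x < i) :
    ((PySem.List.enumerate cs i).foldl
      (fun (st : Nat × PySem.Set Int) p =>
        if st.1 < subL.length ∧ subL[st.1]? = some p.2
        then (st.1 + 1, PySem.Set.add st.2 p.1)
        else st)
      (count, S)).2 = S ++ pvRem cs (subL.drop count) i := by
  induction cs generalizing count S i with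
  | nil => cases h : subL.drop count <;> simp [pvRem, PySem.List.enumerate]
  | cons c cs ih =>
    rw [PySem.List.enumerate_cons, List.foldl_cons]
    by_cases hend : subL.length ≤ count
    · have hdrop : subL.drop count = [] := by simp [hend]
      have hcond : ¬ (count < subL.length ∧ subL[count]? = some c) := by
        intro h; omega
      rw [if_neg hcond, ih count S (i + 1) (by intro x hx; have := hS x hx; omega), hdrop]
      simp [pvRem]
    · have hlt : count < subL.length := by omega
      obtain ⟨p, ps, hdrop⟩ : ∃ p ps, subL.drop count = p :: ps := by
        cases h : subL.drop count with
        | nil => exfalso; have := List.drop_eq_nil_iff.mp h; omega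
        | cons p ps => exact ⟨p, ps, rfl⟩
      have hget : subL[count]? = some p := by
        have : subL[count]? = (subL.drop count)[0]? := by simp [List.getElem?_drop]
        rw [this, hdrop]; rfl
      have hdrop1 : subL.drop (count + 1) = ps := by
        have : subL.drop (count + 1) = (subL.drop count).tail := by rw [List.tail_drop]
        rw [this, hdrop]; rfl
      by_cases hcp : c = p
      · subst hcp
        rw [if_pos ⟨hlt, hget⟩]
        have hadd : PySem.Set.add S i = S ++ [i] :=
          PySem.Set.add_of_not_mem (by intro h; have := hS i h; omega)
        rw [hadd, ih (count + 1) (S ++ [i]) (i + 1)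
              (by intro x hx; rcases List.mem_append.mp hx with h | h
                  · have := hS x h; omega
                  · simp at h; omega),
            hdrop1, hdrop, pvRem, if_pos rfl]
        simp
      · have hcond : ¬ (count < subL.length ∧ subL[count]? = some c) := by
          rintro ⟨_, h⟩; rw [hget] at h; exact hcp (Option.some.inj h).symm
        rw [if_neg hcond, ih count S (i + 1) (by intro x hx; have := hS x hx; omega),
            hdrop, pvRem, if_neg hcp]

lemma keepAll (cs : List Char) (S : List Int) (i : Int) (hS : ∀ x ∈ S, x < i) :
    ((PySem.List.enumerate cs i).filter
      (fun p => !(PySem.Set.contains S p.1))).map (·.2) = cs := by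
  induction cs generalizing i with
  | nil => simp [PySem.List.enumerate]
  | cons c cs ih =>
    rw [PySem.List.enumerate_cons]
    have hni : ¬ PySem.Set.contains S i = true := by
      intro h
      have hm : i ∈ S := by simpa using h
      have := hS i hm; omega
    simp only [List.filter_cons]
    rw [if_pos (by simpa using hni)]
    simp only [List.map_cons]
    rw [ih (i + 1) (by intro x hx; have := hS x hx; omega)]

lemma passTwo (cs rem : List Char) (S : List Int) (i : Int) (hS : ∀ x ∈ S, x < i) :
    ((PySem.List.enumerate cs i).filter
      (fun p => !(PySem.Set.contains (S ++ pvRem cs rem i) p.1))).map (·.2)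
      = pvSpec cs rem := by
  induction cs generalizing rem S i with
  | nil => cases rem <;> simp [PySem.List.enumerate, pvSpec]
  | cons c cs ih =>
    cases rem with
    | nil =>
      simp only [pvRem, List.append_nil, pvSpec]
      exact keepAll (c :: cs) S i hS
    | cons p ps =>
      rw [PySem.List.enumerate_cons]
      by_cases hcp : c = p
      · subst hcp
        have hrem : pvRem (c :: cs) (c :: ps) i = i :: pvRem cs ps (i + 1) := by
          simp [pvRem]
        rw [hrem]
        have hmem : PySem.Set.contains (S ++ i :: pvRem cs ps (i + 1)) i = true := by
          simp
        simp only [List.filter_cons, hmem]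
        rw [if_neg (by simp)]
        have hassoc : S ++ i :: pvRem cs ps (i + 1) = (S ++ [i]) ++ pvRem cs ps (i + 1) := by
          simp
        simp only [hassoc]
        rw [ih ps (S ++ [i]) (i + 1)
              (by intro x hx; rcases List.mem_append.mp hx with h | h
                  · have := hS x h; omega
                  · simp at h; omega)]
        simp [pvSpec]
      · have hrem : pvRem (c :: cs) (p :: ps) i = pvRem cs (p :: ps) (i + 1) := by
          simp [pvRem, hcp]
        rw [hrem]
        have hni : ¬ PySem.Set.contains (S ++ pvRem cs (p :: ps) (i + 1)) i = true := by
          intro h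
          have hmem : i ∈ S ++ pvRem cs (p :: ps) (i + 1) := by simpa using h
          rcases List.mem_append.mp hmem with h' | h'
          · have := hS i h'; omega
          · have := pvRem_ge cs (p :: ps) (i + 1) i h'; omega
        simp only [List.filter_cons]
        rw [if_pos (by simpa using hni)]
        simp only [List.map_cons]
        rw [ih (p :: ps) S (i + 1) (by intro x hx; have := hS x hx; omega)]
        simp [pvSpec, hcp]

lemma subtractSub_eq_spec (inputString subString : String) :
    subtractSub inputString subString
      = String.mk (pvSpec inputString.toList subString.toList) := by
  simp only [subtractSub]
  rw [subtractSub_loop subString.toList inputString.toList 0 [] (by omega)]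
  simp

lemma subtractSub_alt_eq_spec (inputString subString : String) :
    subtractSub_alt inputString subString
      = String.mk (pvSpec inputString.toList subString.toList) := by
  simp only [subtractSub_alt, PySem.Set.empty]
  rw [passOne subString.toList inputString.toList 0 [] 0 (by simp)]
  simp only [List.drop_zero]
  rw [passTwo inputString.toList subString.toList [] 0 (by simp)]

-- ===== VERDICT (by name: the statement is the Claim_ definition above) =====
theorem subtractSub_spec : Claim_equal_subtractSub := by
  intro inputString subString _
  show subtractSub inputString subString = subtractSub_alt inputString subString
  rw [subtractSub_eq_spec, subtractSub_alt_eq_spec]
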